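-- pv_equiv track=rewrite | github.com/AsbestosSoup-dev/wordle-helper | utils.py | respects_letter_counts
-- ===== SOURCE A (Python) =====
-- from collections import Counter
--
-- def _letters_only(s: str) -> str:
--     return "".join(ch for ch in s.lower() if ch.isalpha())
--
-- def parse_letter_counts(s: str) -> dict[str, int]:
--     s = _letters_only(s)
--     return Counter(s) if s else {}
--
-- def respects_letter_counts(word: str, include: str, exclude: str) -> bool:
--     wl = word.lower()
--     wc = Counter(wl)
--     rc = parse_letter_counts(include)
--     ec = parse_letter_counts(exclude)
--
--     for c in rc.keys() & ec.keys():
--         if wc[c] != rc[c]: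
--             return False
--     for c in rc.keys() - ec.keys():
--         if wc[c] < rc[c]:
--             return False
--     for c in ec.keys() - rc.keys():
--         if wc[c] != 0:
--             return False
--     return True
-- ===== SOURCE B (Python) =====
-- def respects_letter_counts(word: str, include: str, exclude: str) -> bool:
--     # Single left-to-right scan of the word with decrementing letter budgets
--     # and early exit, instead of counting the word and partitioning key sets.
--     need = {}
--     for ch in include.lower():
--         if ch.isalpha():
--             need[ch] = need.get(ch, 0) + 1
--     cap = {}
--     for ch in exclude.lower():
--         if ch.isalpha():
--             cap[ch] = need.get(ch, 0)
--     for ch in word.lower():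
--         c = cap.get(ch)
--         if c is not None:
--             if c == 0:
--                 return False
--             cap[ch] = c - 1
--         n = need.get(ch)
--         if n is not None and n > 0:
--             need[ch] = n - 1
--     return all(v == 0 for v in need.values())
-- ===== Notes on version B (the rewrite author's own statement) =====
-- stated objective: alternative
-- what changed: B never builds a Counter of the word or partitions key sets: it builds per-letter budgets (need from include, cap for excluded letters), then makes a single left-to-right scan of the word decrementing budgets with early exit on an exhausted cap, and finally checks all needs reached zero.
import Mathlib
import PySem

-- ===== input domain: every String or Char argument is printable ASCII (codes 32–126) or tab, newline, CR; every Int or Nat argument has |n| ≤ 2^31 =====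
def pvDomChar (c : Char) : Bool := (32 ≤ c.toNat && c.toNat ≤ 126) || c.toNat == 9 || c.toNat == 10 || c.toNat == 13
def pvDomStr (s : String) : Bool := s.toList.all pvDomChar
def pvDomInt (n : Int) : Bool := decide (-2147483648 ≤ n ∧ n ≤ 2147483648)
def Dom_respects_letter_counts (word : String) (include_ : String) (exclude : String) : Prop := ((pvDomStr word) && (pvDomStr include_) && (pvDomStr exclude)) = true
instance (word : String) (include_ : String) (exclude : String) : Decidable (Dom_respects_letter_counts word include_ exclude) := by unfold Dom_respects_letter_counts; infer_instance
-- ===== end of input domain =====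

-- B replaces counting the word + three set-partition loops by one budget-decrementing
-- scan of the word with early exit; objective: alternative decomposition, same cost.

-- ===== PORT A =====
-- _letters_only(s): lowercase, keep alphabetic characters (as a list of chars)
def pvLettersOnly (s : String) : List Char :=
  (PySem.Chars.lower s.toList).filter (fun ch => PySem.Chars.isalpha ch)

-- parse_letter_counts(s): Counter of the letters (Counter of [] = empty dict = {})
def parse_letter_counts (s : String) : PySem.Dict Char Int :=
  PySem.Dict.counter (pvLettersOnly s)

def respects_letter_counts (word : String) (include_ : String) (exclude : String) : Bool :=
  let wl := PySem.Chars.lower word.toList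
  let wc := PySem.Dict.counter wl
  let rc := parse_letter_counts include_
  let ec := parse_letter_counts exclude
  -- 'for c in ...: if bad: return False' = any bad -> false
  if (rc.keys.filter (fun c => ec.keys.contains c)).any (fun c => wc.getD c 0 != rc.getD c 0) then
    false
  else if (rc.keys.filter (fun c => !ec.keys.contains c)).any (fun c => wc.getD c 0 < rc.getD c 0) then
    false
  else if (ec.keys.filter (fun c => !rc.keys.contains c)).any (fun c => wc.getD c 0 != 0) then
    false
  else
    true

-- ===== PORT B =====
-- need: for ch in include.lower(): if ch.isalpha(): need[ch] = need.get(ch, 0) + 1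
def pvBNeed (include_ : String) : PySem.Dict Char Int :=
  (PySem.Chars.lower include_.toList).foldl
    (fun d ch => if PySem.Chars.isalpha ch then d.insert ch (d.getD ch 0 + 1) else d)
    PySem.Dict.empty

-- cap: for ch in exclude.lower(): if ch.isalpha(): cap[ch] = need.get(ch, 0)
def pvBCap (need : PySem.Dict Char Int) (exclude : String) : PySem.Dict Char Int :=
  (PySem.Chars.lower exclude.toList).foldl
    (fun d ch => if PySem.Chars.isalpha ch then d.insert ch (need.getD ch 0) else d)
    PySem.Dict.empty

-- n = need.get(ch); if n is not None and n > 0: need[ch] = n - 1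
def pvBStep (need : PySem.Dict Char Int) (ch : Char) : PySem.Dict Char Int :=
  match need.get? ch with
  | some n => if 0 < n then need.insert ch (n - 1) else need
  | none => need

-- the word loop with early return, then: all(v == 0 for v in need.values())
def pvBScan (cap need : PySem.Dict Char Int) : List Char -> Bool
  | [] => need.values.all (fun v => v == 0)
  | ch :: rest =>
    match cap.get? ch with
    | some c =>
      if c == 0 then false
      else pvBScan (cap.insert ch (c - 1)) (pvBStep need ch) rest
    | none => pvBScan cap (pvBStep need ch) rest

def respects_letter_counts_alt (word : String) (include_ : String) (exclude : String) : Bool :=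
  let need := pvBNeed include_
  let cap := pvBCap need exclude
  pvBScan cap need (PySem.Chars.lower word.toList)

-- ===== PRECONDITION & SPEC =====
def Spec_respects_letter_counts (word : String) (include_ : String) (exclude : String) (out : Bool) : Prop := out = respects_letter_counts_alt word include_ exclude
instance (word : String) (include_ : String) (exclude : String) (out : Bool) : Decidable (Spec_respects_letter_counts word include_ exclude out) := by unfold Spec_respects_letter_counts; infer_instance

-- ===== CLAIM (what is proved, stated in full; the proofs are below) =====
def Claim_equal_respects_letter_counts : Prop := ∀ (word : String) (include_ : String) (exclude : String), Dom_respects_letter_counts word include_ exclude → Spec_respects_letter_counts word include_ exclude (respects_letter_counts word include_ exclude)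

-- ===== LEMMAS AND PROOFS =====

-- the guarded need-building fold is Counter of the kept letters
theorem pvBNeed_eq_counter (s : String) :
    pvBNeed s = PySem.Dict.counter (pvLettersOnly s) := by
  unfold pvBNeed
  rw [PySem.List.foldl_if_eq_foldl_filter]
  exact PySem.Dict.foldl_insert_getD_add_one_eq_counter _

-- getD after a fold inserting key-determined values
theorem getD_foldl_insert_const (l : List Char) (f : Char → Int)
    (d : PySem.Dict Char Int) (k : Char) :
    (l.foldl (fun d ch => d.insert ch (f ch)) d).getD k 0
      = if k ∈ l then f k else d.getD k 0 := by
  induction l generalizing d with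
  | nil => simp
  | cons x xs ih =>
    rw [List.foldl_cons, ih]
    by_cases hk : k ∈ xs <;> by_cases hx : k = x <;>
      simp [hk, hx, PySem.Dict.getD_insert]

-- keys are unchanged by the need-update step
theorem pvBStep_keys (need : PySem.Dict Char Int) (ch : Char) :
    (pvBStep need ch).keys = need.keys := by
  unfold pvBStep
  cases h : need.get? ch with
  | none => rfl
  | some n =>
    by_cases hn : 0 < n
    · simp only [hn, if_true]
      exact PySem.Dict.keys_insert_of_contains _ _
        (by rw [PySem.Dict.contains_eq_isSome_get?, h]; rfl)
    · simp only [hn, if_false]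

-- value of the need-update step
theorem pvBStep_getD (need : PySem.Dict Char Int) (ch k : Char) :
    (pvBStep need ch).getD k 0
      = if k = ch ∧ 0 < need.getD ch 0 then need.getD ch 0 - 1 else need.getD k 0 := by
  unfold pvBStep
  cases h : need.get? ch with
  | none =>
    have h0 : need.getD ch 0 = 0 := PySem.Dict.getD_of_get?_eq_none need 0 h
    simp [h0]
  | some n =>
    have h0 : need.getD ch 0 = n := PySem.Dict.getD_of_get?_eq_some need 0 h
    by_cases hn : 0 < n <;>
      by_cases hk : k = ch <;>
        simp [hn, hk, h0, PySem.Dict.getD_insert]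

-- the need-update step keeps values nonnegative
theorem pvBStep_getD_nonneg (need : PySem.Dict Char Int) (ch k : Char)
    (hneed : ∀ j, 0 ≤ need.getD j 0) : 0 ≤ (pvBStep need ch).getD k 0 := by
  rw [pvBStep_getD]
  split_ifs with h
  · have := hneed ch; omega
  · exact hneed k

-- how one need-update step shifts the final "need met" bound
theorem pvBStep_le_iff (need : PySem.Dict Char Int) (ch k : Char)
    (hneed : ∀ j, 0 ≤ need.getD j 0) (x : Int) (hx : 0 ≤ x) :
    ((pvBStep need ch).getD k 0 ≤ x) ↔ (need.getD k 0 ≤ x + if k = ch then 1 else 0) := by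
  rw [pvBStep_getD]
  rcases eq_or_ne k ch with he | he
  · subst he
    have h0 := hneed k
    by_cases hp : 0 < need.getD k 0
    · simp only [hp, and_true, if_true]
      omega
    · simp only [hp, and_false, if_false]
      omega
  · simp [he]

-- characterization of the scanning loop: every cap budget survives, every need is met
theorem pvBScan_spec (l : List Char) (cap need : PySem.Dict Char Int)
    (hcap : ∀ k, 0 ≤ cap.getD k 0) (hneed : ∀ k, 0 ≤ need.getD k 0)
    (hnd : need.keys.Nodup) :
    (pvBScan cap need l = true ↔
      (∀ k ∈ cap.keys, (l.count k : Int) ≤ cap.getD k 0) ∧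
      (∀ k ∈ need.keys, need.getD k 0 ≤ (l.count k : Int))) := by
  induction l generalizing cap need with
  | nil =>
    simp only [pvBScan, List.count_nil, Int.natCast_zero]
    rw [PySem.Dict.values_eq_map_keys need hnd 0, List.all_map, List.all_eq_true]
    constructor
    · intro h
      exact ⟨fun k _ => hcap k, fun k hk => by have := h k hk; simp at this; omega⟩
    · intro ⟨_, h2⟩ k hk
      have := h2 k hk
      have := hneed k
      simp only [Function.comp_apply, beq_iff_eq]
      omega
  | cons ch rest ih =>
    have hstep : ∀ (k : Char) (l : List Char),
        ((List.count k (ch :: l) : Nat) : Int) = (List.count k l : Int) + if k = ch then 1 else 0 := by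
      intro k l
      rcases eq_or_ne k ch with hk | hk
      · simp [hk]
      · simp [hk, Ne.symm hk]
    cases hget : cap.get? ch with
    | none =>
      have hcontf : cap.contains ch = false :=
        (PySem.Dict.get?_eq_none_iff_contains cap ch).mp hget
      have hch : ch ∉ cap.keys := fun hm => by
        simp [(PySem.Dict.contains_iff_mem_keys cap ch).mpr hm] at hcontf
      have hred : pvBScan cap need (ch :: rest) = pvBScan cap (pvBStep need ch) rest := by
        rw [pvBScan, hget]
      rw [hred, ih cap (pvBStep need ch) hcap
            (fun k => pvBStep_getD_nonneg need ch k hneed)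
            (by rw [pvBStep_keys]; exact hnd),
          pvBStep_keys]
      refine and_congr (forall₂_congr fun k hk => ?_) (forall₂_congr fun k hk => ?_)
      · have hne : k ≠ ch := fun he => hch (he ▸ hk)
        rw [hstep, if_neg hne, add_zero]
      · rw [pvBStep_le_iff need ch k hneed _ (Int.natCast_nonneg _), hstep]
    | some c =>
      have hcont : cap.contains ch = true := by
        rw [PySem.Dict.contains_eq_isSome_get?, hget]; rfl
      have hmem : ch ∈ cap.keys := (PySem.Dict.contains_iff_mem_keys cap ch).mp hcont
      have hgd : cap.getD ch 0 = c := PySem.Dict.getD_of_get?_eq_some cap 0 hget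
      by_cases hc : c = 0
      · have hred : pvBScan cap need (ch :: rest) = false := by
          rw [pvBScan, hget]; simp [hc]
        rw [hred]
        simp only [Bool.false_eq_true, false_iff, not_and]
        intro h1 _
        have := h1 ch hmem
        rw [hstep, if_pos rfl, hgd, hc] at this
        omega
      · have hred : pvBScan cap need (ch :: rest)
            = pvBScan (cap.insert ch (c - 1)) (pvBStep need ch) rest := by
          rw [pvBScan, hget]; simp [hc]
        rw [hred, ih (cap.insert ch (c - 1)) (pvBStep need ch)
              (fun k => by
                rw [PySem.Dict.getD_insert]
                split_ifs with h
                exacts [by have := hcap ch; rw [hgd] at this; omega, hcap k])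
              (fun k => pvBStep_getD_nonneg need ch k hneed)
              (by rw [pvBStep_keys]; exact hnd),
            pvBStep_keys, PySem.Dict.keys_insert_of_contains _ _ hcont]
        refine and_congr (forall₂_congr fun k hk => ?_) (forall₂_congr fun k hk => ?_)
        · rw [PySem.Dict.getD_insert, hstep]
          rcases eq_or_ne k ch with he | he
          · subst he
            rw [if_pos rfl, if_pos rfl, hgd]
            constructor <;> intro <;> omega
          · rw [if_neg he, if_neg he, add_zero]
        · rw [pvBStep_le_iff need ch k hneed _ (Int.natCast_nonneg _), hstep]

-- the three early-return loops of A, as one boolean expression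
theorem if3_bool (a b c : Bool) :
    (if a then false else if b then false else if c then false else true) = (!a && !b && !c) := by
  cases a <;> cases b <;> cases c <;> rfl

-- ===== VERDICT (by name: the statement is the Claim_ definition above) =====
theorem respects_letter_counts_spec : Claim_equal_respects_letter_counts := by
  intro word include_ exclude _
  unfold Spec_respects_letter_counts
  rw [Bool.eq_iff_iff]
  unfold respects_letter_counts respects_letter_counts_alt parse_letter_counts
  simp only [pvBNeed_eq_counter]
  set wl := PySem.Chars.lower word.toList with hwl
  set LI := pvLettersOnly include_ with hLI
  set LE := pvLettersOnly exclude with hLE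
  have hcapeq : pvBCap (PySem.Dict.counter LI) exclude
      = LE.foldl (fun d ch => d.insert ch ((PySem.Dict.counter LI).getD ch 0)) PySem.Dict.empty := by
    unfold pvBCap
    rw [PySem.List.foldl_if_eq_foldl_filter]
    rfl
  rw [hcapeq]
  set cap := LE.foldl (fun d ch => d.insert ch ((PySem.Dict.counter LI).getD ch 0)) PySem.Dict.empty
    with hcap
  have hcapgetD : ∀ k, cap.getD k 0 = if k ∈ LE then ((LI.count k : Nat) : Int) else 0 := by
    intro k
    rw [hcap, getD_foldl_insert_const]
    split_ifs <;> simp [PySem.Dict.getD_counter]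
  have hcapkeys : cap.keys = PySem.Set.ofList LE := by
    rw [hcap, PySem.Dict.keys_foldl_insert, PySem.Dict.keys_empty, PySem.Set.update_nil_left]
  rw [pvBScan_spec wl cap (PySem.Dict.counter LI)
        (fun k => by
          rw [hcapgetD]
          split_ifs
          exacts [Int.natCast_nonneg _, le_refl 0])
        (fun k => by rw [PySem.Dict.getD_counter]; exact Int.natCast_nonneg _)
        (PySem.Dict.nodup_keys_counter LI)]
  rw [hcapkeys, if3_bool]
  simp only [PySem.Dict.keys_counter, PySem.Dict.getD_counter, hcapgetD, PySem.Set.mem_ofList,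
    Bool.and_eq_true, Bool.not_eq_true', List.any_eq_false, List.mem_filter,
    List.contains_eq_mem, decide_eq_false_iff_not, bne_iff_ne, decide_eq_true_eq, not_lt, ne_eq,
    not_not, and_imp]
  constructor
  · rintro ⟨⟨h1, h2⟩, h3⟩
    constructor
    · intro k hk
      rw [if_pos hk]
      by_cases hki : k ∈ LI
      · have := h1 k hki hk
        omega
      · have h0 : LI.count k = 0 := List.count_eq_zero.mpr hki
        have := h3 k hk hki
        omega
    · intro k hk
      by_cases hke : k ∈ LE
      · have := h1 k hk hke
        omega
      · have := h2 k hk hke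
        omega
  · rintro ⟨g1, g2⟩
    refine ⟨⟨fun c hci hce => ?_, fun c hci hce => ?_⟩, fun c hce hci => ?_⟩
    · have ha := g1 c hce
      rw [if_pos hce] at ha
      have hb := g2 c hci
      omega
    · have := g2 c hci
      omega
    · have ha := g1 c hce
      rw [if_pos hce] at ha
      have h0 : LI.count c = 0 := List.count_eq_zero.mpr hci
      omega
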